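-- pv_equiv track=rewrite | github.com/m-franc/kata | scrabble.py | get_best_word
-- ===== SOURCE A (Python) =====
-- from string import ascii_uppercase as alph_up
--
-- def eval_word(letters_and_points, word):
--     point = 0
--     for c in word:
--         point += letters_and_points[c]
--     return point
--
-- def get_best_word(points, words):
--     #first, create dict to have letter and their point together
--     letters_and_points = dict.fromkeys([a for a in alph_up])
--     for i, p in enumerate(points):
--         letters_and_points[alph_up[i]] = p
--     #second, for each word, fill an array as a mirror, of their score
--     points_words = []
--     for word in words:
--         points_words.append(eval_word(letters_and_points, word))
--     #third, get the highest score, create and array with all of words which have this score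
--     max_point = max(points_words)
--     highest_word = []
--     for i, p in enumerate(points_words):
--         if p == max_point:
--             highest_word.append(words[i])
--     #and return where - in words - the shortest of the highest_word is
--     return words.index(min(highest_word, key=len))
-- ===== SOURCE B (Python) =====
-- from string import ascii_uppercase as alph_up
--
-- def get_best_word(points, words):
--     # one pass: keep the first index whose (score, -length) key is strictly best
--     def score(w):
--         return sum(points[alph_up.index(c)] for c in w)
--     best_i = None
--     best_key = None
--     for i, w in enumerate(words):
--         key = (score(w), -len(w))
--         if best_i is None or key > best_key:
--             best_i, best_key = i, key
--     return best_i
-- ===== Notes on version B (the rewrite author's own statement) =====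
-- stated objective: simpler
-- what changed: Replaced A's letter dict plus four sequential passes (build scores array, take max, filter the tied words, min-by-len, then words.index) by a single left-to-right pass that keeps the first index whose (score, -length) key is lexicographically largest.
import Mathlib
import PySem

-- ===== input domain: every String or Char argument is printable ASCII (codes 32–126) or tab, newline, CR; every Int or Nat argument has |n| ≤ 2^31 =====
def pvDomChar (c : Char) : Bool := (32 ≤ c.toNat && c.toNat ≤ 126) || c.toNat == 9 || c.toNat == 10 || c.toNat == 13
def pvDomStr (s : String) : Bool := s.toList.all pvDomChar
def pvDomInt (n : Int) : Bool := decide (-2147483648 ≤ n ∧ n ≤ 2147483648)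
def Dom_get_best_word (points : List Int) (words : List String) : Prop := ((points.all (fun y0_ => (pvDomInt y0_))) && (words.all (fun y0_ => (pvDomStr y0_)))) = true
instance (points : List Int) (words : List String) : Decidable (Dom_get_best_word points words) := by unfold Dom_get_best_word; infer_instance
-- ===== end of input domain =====

-- B replaces A's dict + four passes (scores array, max, filter of ties, min-by-len, words.index)
-- by a single first-argmax pass over (score, -length) keys; objective: simpler.

-- ===== PORT A =====
-- string.ascii_uppercase
def pvAlph : List Char := "ABCDEFGHIJKLMNOPQRSTUVWXYZ".toList

-- letters_and_points[c]: a missing key (KeyError) and a None value (TypeError on +) are both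
-- outside Pre_; the .getD defaults on those error paths are never reached under Pre_.
def eval_word (letters_and_points : PySem.Dict Char (Option Int)) (word : String) : Int :=
  word.toList.foldl (fun point c => point + ((letters_and_points.get? c).getD none).getD 0) 0

def get_best_word (points : List Int) (words : List String) : Int :=
  -- letters_and_points = dict.fromkeys([a for a in alph_up])
  let lp0 : PySem.Dict Char (Option Int) :=
    pvAlph.foldl (fun d a => d.insert a none) PySem.Dict.empty
  -- for i, p in enumerate(points): letters_and_points[alph_up[i]] = p   (alph_up[i] IndexError outside Pre_)
  let letters_and_points :=
    (PySem.List.enumerate points).foldl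
      (fun d ip => d.insert ((PySem.List.pyGet? pvAlph ip.1).getD 'A') (some ip.2)) lp0
  -- points_words: mirror array of scores
  let points_words := words.foldl (fun acc word => acc ++ [eval_word letters_and_points word]) []
  -- max_point = max(points_words)   (ValueError on empty list outside Pre_)
  let max_point := (PySem.List.max? points_words (fun x => x)).getD 0
  -- highest_word: all words whose score is max_point
  let highest_word :=
    (PySem.List.enumerate points_words).foldl
      (fun acc ip => if ip.2 = max_point then acc ++ [(PySem.List.pyGet? words ip.1).getD ""] else acc)
      ([] : List String)
  -- return words.index(min(highest_word, key=len))
  ((PySem.List.index? words ((PySem.List.min? highest_word (fun w => PySem.Str.len w)).getD "")).map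
      (fun n => (n : Int))).getD 0

-- ===== PORT B =====
-- Python tuple comparison key > best_key (lexicographic on the pair)
def pvKeyLt (a b : Int × Int) : Bool := a.1 < b.1 || (a.1 == b.1 && a.2 < b.2)

-- score(w) = sum(points[alph_up.index(c)] for c in w); ValueError/IndexError paths outside Pre_
def pvScore (points : List Int) (w : String) : Int :=
  w.toList.foldl
    (fun s c => s + (PySem.List.pyGet? points (((PySem.List.index? pvAlph c).getD 0 : Nat) : Int)).getD 0) 0

def get_best_word_alt (points : List Int) (words : List String) : Int :=
  -- one pass: keep the first index whose (score, -length) key is strictly best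
  match (PySem.List.enumerate words).foldl
      (fun (acc : Option (Int × (Int × Int))) iw =>
        let key := (pvScore points iw.2, -(PySem.Str.len iw.2))
        match acc with
        | none => some (iw.1, key)
        | some bb => if pvKeyLt bb.2 key then some (iw.1, key) else some bb)
      none with
  | some bb => bb.1
  | none => 0   -- words = []: Python B returns None (A raises ValueError); outside Pre_

-- ===== PRECONDITION & SPEC =====
-- Pre_ excludes exactly the inputs where A raises: empty words (ValueError on max), more than 26
-- points (IndexError on alph_up[i]), and any word character that is not an uppercase letter with
-- an assigned point (KeyError / TypeError on None + int).
def Pre_get_best_word (points : List Int) (words : List String) : Prop :=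
  words ≠ [] ∧ points.length ≤ 26 ∧
    words.all (fun w => w.toList.all (fun c => 65 ≤ c.toNat && c.toNat < 65 + points.length)) = true
instance (points : List Int) (words : List String) : Decidable (Pre_get_best_word points words) := by
  unfold Pre_get_best_word; infer_instance

def pvWitness_get_best_word : List Int × List String := ([1, 2, 3], ["ABC", "A", "CA"])

def Spec_get_best_word (points : List Int) (words : List String) (out : Int) : Prop :=
  out = get_best_word_alt points words
instance (points : List Int) (words : List String) (out : Int) : Decidable (Spec_get_best_word points words out) := by
  unfold Spec_get_best_word; infer_instance

-- ===== CLAIM (what is proved, stated in full; the proofs are below) =====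
def Claim_equal_get_best_word : Prop := ∀ (points : List Int) (words : List String), Dom_get_best_word points words → Pre_get_best_word points words → Spec_get_best_word points words (get_best_word points words)

-- ===== LEMMAS AND PROOFS =====

-- the alphabet dict built by A's first two loops (definitionally the port's letters_and_points)
def lpOf (points : List Int) : PySem.Dict Char (Option Int) :=
  (PySem.List.enumerate points).foldl
    (fun d ip => d.insert ((PySem.List.pyGet? pvAlph ip.1).getD 'A') (some ip.2))
    (pvAlph.foldl (fun d a => d.insert a none) PySem.Dict.empty)

theorem pvAlph_toNat : ∀ j < 26, ∀ (h : j < pvAlph.length), (pvAlph[j]).toNat = 65 + j := by decide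

theorem pvAlph_length : pvAlph.length = 26 := by decide

theorem pvAlph_getElem_of_bounds (c : Char) (h1 : 65 ≤ c.toNat) (h2 : c.toNat ≤ 90)
    (h : c.toNat - 65 < pvAlph.length) : pvAlph[c.toNat - 65] = c := by
  have := pvAlph_toNat (c.toNat - 65) (by omega) h
  have hn : (pvAlph[c.toNat - 65]).toNat = c.toNat := by omega
  exact Char.ext (UInt32.toNat_inj.mp hn)

theorem index?_pvAlph (c : Char) (h1 : 65 ≤ c.toNat) (h2 : c.toNat ≤ 90) :
    PySem.List.index? pvAlph c = some (c.toNat - 65) := by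
  have h : c.toNat - 65 < pvAlph.length := by rw [pvAlph_length]; omega
  rw [PySem.List.index?_eq_idxOf?]
  rw [List.idxOf?_eq_some_iff]
  refine ⟨h, pvAlph_getElem_of_bounds c h1 h2 h, ?_⟩
  intro j hj hc
  have h2j : (pvAlph[j]).toNat = 65 + j := pvAlph_toNat j (by omega) (by omega)
  rw [hc] at h2j
  omega

theorem lp_get_miss (ps : List Int) (s : Nat) (d : PySem.Dict Char (Option Int)) (c : Char)
    (hs : s + ps.length ≤ 26)
    (hmiss : ∀ j, (hj : j < ps.length) → ∀ (hb : s + j < pvAlph.length), c ≠ pvAlph[s + j]) :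
    ((PySem.List.enumerate ps (s : Int)).foldl
      (fun d ip => d.insert ((PySem.List.pyGet? pvAlph ip.1).getD 'A') (some ip.2)) d).get? c
      = d.get? c := by
  induction ps generalizing s d with
  | nil => simp [PySem.List.enumerate_nil]
  | cons p ps ih =>
    rw [PySem.List.enumerate_cons, List.foldl_cons]
    have hcast : (s : Int) + 1 = ((s + 1 : Nat) : Int) := by push_cast; ring
    rw [hcast]
    rw [ih (s+1) _ (by simp at hs ⊢; omega) (fun j hj hb => by
      have e : s + 1 + j = s + (j + 1) := by omega
      simp only [e]
      exact hmiss (j+1) (by simp; omega) (by omega))]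
    have hsl : s < pvAlph.length := by rw [pvAlph_length]; simp at hs; omega
    rw [PySem.List.pyGet?_natCast, List.getElem?_eq_getElem hsl]
    simp only [Option.getD_some]
    rw [PySem.Dict.get?_insert]
    have hne : c ≠ pvAlph[s] := by
      have := hmiss 0 (by simp) (by simpa using hsl)
      simpa using this
    simp [hne]

theorem lp_get_hit (ps : List Int) (s j : Nat) (d : PySem.Dict Char (Option Int)) (c : Char)
    (hj : j < ps.length) (hs : s + ps.length ≤ 26) (hb : s + j < pvAlph.length)
    (hc : c = pvAlph[s + j]) :
    ((PySem.List.enumerate ps (s : Int)).foldl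
      (fun d ip => d.insert ((PySem.List.pyGet? pvAlph ip.1).getD 'A') (some ip.2)) d).get? c
      = some (some ps[j]) := by
  induction ps generalizing s j d with
  | nil => simp at hj
  | cons p ps ih =>
    rw [PySem.List.enumerate_cons, List.foldl_cons]
    have hcast : (s : Int) + 1 = ((s + 1 : Nat) : Int) := by push_cast; ring
    rw [hcast]
    have hsl : s < pvAlph.length := by rw [pvAlph_length]; simp at hs; omega
    cases j with
    | zero =>
      rw [lp_get_miss ps (s+1) _ c (by simp at hs; omega) (fun u hu hb' => by
        intro hcontr
        have h1 := pvAlph_toNat (s + 1 + u) (by rw [pvAlph_length] at hb'; omega) hb'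
        have h2 := pvAlph_toNat (s + 0) (by rw [pvAlph_length] at hb; omega) hb
        rw [← hcontr, hc] at h1
        omega)]
      rw [PySem.List.pyGet?_natCast, List.getElem?_eq_getElem hsl]
      simp only [Option.getD_some]
      rw [PySem.Dict.get?_insert]
      simp only [Nat.add_zero] at hc
      simp [hc]
    | succ j' =>
      have e : s + (j' + 1) = (s + 1) + j' := by omega
      simp only [e] at hb hc
      rw [ih (s+1) j' _ (by simp at hj; omega) (by simp at hs ⊢; omega) hb hc]
      simp

theorem lp_lookup (points : List Int) (hlen : points.length ≤ 26) (c : Char)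
    (hc1 : 65 ≤ c.toNat) (hc2 : c.toNat < 65 + points.length)
    (h : c.toNat - 65 < points.length) :
    (lpOf points).get? c = some (some points[c.toNat - 65]) := by
  unfold lpOf
  rw [show ((0 : Int)) = ((0 : Nat) : Int) from rfl]
  exact lp_get_hit points 0 (c.toNat - 65) _ c h (by omega)
    (by rw [pvAlph_length]; omega)
    (by simp only [Nat.zero_add]; exact (pvAlph_getElem_of_bounds c hc1 (by omega) (by rw [pvAlph_length]; omega)).symm)

-- under Pre_, A's dict-based word score is B's index-based word score
theorem eval_eq (points : List Int) (w : String) (hlen : points.length ≤ 26)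
    (hw : ∀ c ∈ w.toList, 65 ≤ c.toNat ∧ c.toNat < 65 + points.length) :
    eval_word (lpOf points) w = pvScore points w := by
  unfold eval_word pvScore
  apply PySem.List.foldl_congr_mem
  intro acc c hc
  obtain ⟨h1, h2⟩ := hw c hc
  have h : c.toNat - 65 < points.length := by omega
  rw [lp_lookup points hlen c h1 h2 h, index?_pvAlph c h1 (by omega)]
  simp only [Option.getD_some]
  rw [PySem.List.pyGet?_natCast, List.getElem?_eq_getElem h]
  simp

theorem min?_append_singleton {α : Type} (qs : List α) (x : α) (key : α → Int) :
    PySem.List.min? (qs ++ [x]) key =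
      match PySem.List.min? qs key with
      | none => some x
      | some m => if key x < key m then some x else some m := by
  rw [PySem.List.min?, PySem.List.min?, List.foldl_append, List.foldl_cons, List.foldl_nil]
  rfl

-- Python's min(xs, key=…) is the FIRST minimum: everything before it is strictly larger
theorem min?_first {α : Type} (xs : List α) (key : α → Int) (m : α)
    (h : PySem.List.min? xs key = some m) :
    ∃ t, ∃ (ht : t < xs.length), xs[t] = m ∧ ∀ u, (hu : u < t) → key m < key xs[u] := by
  induction xs using List.reverseRecOn generalizing m with
  | nil => simp [PySem.List.min?] at h
  | append_singleton qs x ih =>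
    rw [min?_append_singleton] at h
    rcases hq : PySem.List.min? qs key with _ | m'
    · rw [hq] at h
      simp at h
      subst h
      have hqnil : qs = [] := (PySem.List.min?_eq_none_iff qs key).mp hq
      subst hqnil
      exact ⟨0, by simp, by simp, fun u hu => by omega⟩
    · rw [hq] at h
      obtain ⟨t, ht, he, hfirst⟩ := ih m' hq
      simp only at h
      by_cases hlt : key x < key m'
      · rw [if_pos hlt] at h
        obtain rfl : x = m := by simpa using h
        refine ⟨qs.length, by simp, by simp, fun u hu => ?_⟩
        have hmin := PySem.List.min?_isMin hq qs[u] (by simp [List.getElem_mem])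
        rw [List.getElem_append_left hu]
        omega
      · rw [if_neg hlt] at h
        obtain rfl : m' = m := by simpa using h
        refine ⟨t, by simp; omega, by rw [List.getElem_append_left ht]; exact he, fun u hu => ?_⟩
        rw [List.getElem_append_left (by omega)]
        exact hfirst u hu

theorem foldB_append_singleton (qs : List (Int × (Int × Int))) (x : Int × (Int × Int)) :
    (qs ++ [x]).foldl
        (fun (acc : Option (Int × (Int × Int))) p =>
          match acc with
          | none => some p
          | some bb => if pvKeyLt bb.2 p.2 then some p else some bb) none =
      match qs.foldl
        (fun (acc : Option (Int × (Int × Int))) p =>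
          match acc with
          | none => some p
          | some bb => if pvKeyLt bb.2 p.2 then some p else some bb) none with
      | none => some x
      | some bb => if pvKeyLt bb.2 x.2 then some x else some bb := by
  rw [List.foldl_append, List.foldl_cons, List.foldl_nil]

theorem foldB_ne_none (qs : List (Int × (Int × Int))) (h : qs ≠ []) :
    qs.foldl
        (fun (acc : Option (Int × (Int × Int))) p =>
          match acc with
          | none => some p
          | some bb => if pvKeyLt bb.2 p.2 then some p else some bb) none ≠ none := by
  induction qs using List.reverseRecOn with
  | nil => simp at h
  | append_singleton qs x ih =>
    rw [foldB_append_singleton]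
    rcases qs.foldl _ none with _ | bb
    · simp
    · simp only
      split <;> simp

-- B's loop keeps the FIRST index whose key is maximal
theorem foldB_first (pairs : List (Int × (Int × Int))) (h : pairs ≠ []) :
    ∃ t, ∃ (ht : t < pairs.length),
      pairs.foldl
        (fun (acc : Option (Int × (Int × Int))) p =>
          match acc with
          | none => some p
          | some bb => if pvKeyLt bb.2 p.2 then some p else some bb) none = some pairs[t] ∧
      (∀ u, (hu : u < pairs.length) → pvKeyLt (pairs[t]).2 (pairs[u]).2 = false) ∧
      (∀ u, (hu : u < t) → pvKeyLt (pairs[u]).2 (pairs[t]).2 = true) := by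
  induction pairs using List.reverseRecOn with
  | nil => simp at h
  | append_singleton qs x ih =>
    rcases hq : qs.foldl
        (fun (acc : Option (Int × (Int × Int))) p =>
          match acc with
          | none => some p
          | some bb => if pvKeyLt bb.2 p.2 then some p else some bb) none with _ | bb
    · have hqnil : qs = [] := by
        by_contra hne
        exact foldB_ne_none qs hne hq
      subst hqnil
      refine ⟨0, by simp, ?_, fun u hu => by simp [pvKeyLt], fun u hu => by omega⟩
      simp [List.foldl_cons]
    · have hqne : qs ≠ [] := by rintro rfl; simp [List.foldl_nil] at hq
      obtain ⟨t, ht, he, hmax, hfirst⟩ := ih hqne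
      rw [hq] at he
      obtain rfl : bb = qs[t] := by simpa using he
      rw [foldB_append_singleton, hq]
      simp only
      by_cases hlt : pvKeyLt (qs[t]).2 x.2 = true
      · rw [if_pos hlt]
        refine ⟨qs.length, by simp, by simp, fun u hu => ?_, fun u hu => ?_⟩
        · simp only [List.length_append, List.length_singleton] at hu
          by_cases hu' : u < qs.length
          · rw [List.getElem_append_left hu', List.getElem_append_right (by omega)]
            have h1 := hmax u hu'
            simp [pvKeyLt] at h1 hlt ⊢
            omega
          · have : u = qs.length := by omega
            subst this
            rw [List.getElem_append_right (by omega)]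
            simp [pvKeyLt]
        · rw [List.getElem_append_left hu, List.getElem_append_right (by omega)]
          have h1 := hmax u (by omega)
          simp only [List.getElem_singleton]
          simp [pvKeyLt] at h1 hlt ⊢
          omega
      · rw [if_neg hlt]
        refine ⟨t, by simp; omega, by rw [List.getElem_append_left ht], fun u hu => ?_, fun u hu => ?_⟩
        · simp only [List.length_append, List.length_singleton] at hu
          rw [List.getElem_append_left ht]
          by_cases hu' : u < qs.length
          · rw [List.getElem_append_left hu']
            exact hmax u hu'
          · have : u = qs.length := by omega
            subst this
            rw [List.getElem_append_right (by omega)]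
            simpa using (Bool.not_eq_true _).mp hlt
        · rw [List.getElem_append_left ht, List.getElem_append_left (by omega)]
          exact hfirst u hu

-- A with its let-bindings expanded and the dict named (definitional)
theorem A_unfold (points : List Int) (words : List String) :
    get_best_word points words =
    ((PySem.List.index? words
        ((PySem.List.min?
          ((PySem.List.enumerate
              (words.foldl (fun acc word => acc ++ [eval_word (lpOf points) word]) [])).foldl
            (fun acc ip =>
              if ip.2 = (PySem.List.max?
                  (words.foldl (fun acc word => acc ++ [eval_word (lpOf points) word]) [])
                  (fun x => x)).getD 0
              then acc ++ [(PySem.List.pyGet? words ip.1).getD ""] else acc)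
            ([] : List String))
          (fun w => PySem.Str.len w)).getD "")).map (fun n => (n : Int))).getD 0 := rfl


-- the heart of the claim: A's max→filter→min-by-len→index pipeline picks the same index as
-- B's single first-argmax pass, for ANY score function sc
theorem select_eq (sc : String → Int) (words : List String) (hwne : words ≠ []) :
    ((PySem.List.index? words
        ((PySem.List.min?
          ((PySem.List.enumerate (words.map sc)).foldl
            (fun acc ip =>
              if ip.2 = (PySem.List.max? (words.map sc) (fun x => x)).getD 0
              then acc ++ [(PySem.List.pyGet? words ip.1).getD ""] else acc)
            ([] : List String))
          (fun w => PySem.Str.len w)).getD "")).map (fun n => (n : Int))).getD 0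
    = match (PySem.List.enumerate words).foldl
        (fun (acc : Option (Int × (Int × Int))) iw =>
          let key := (sc iw.2, -(PySem.Str.len iw.2))
          match acc with
          | none => some (iw.1, key)
          | some bb => if pvKeyLt bb.2 key then some (iw.1, key) else some bb)
        none with
      | some bb => bb.1
      | none => 0 := by
  -- ---- the max score m ----
  set m := (PySem.List.max? (words.map sc) (fun x => x)).getD 0 with hm
  have hmax : PySem.List.max? (words.map sc) (fun x => x) = some m := by
    rcases hx : PySem.List.max? (words.map sc) (fun x => x) with _ | v
    · exact absurd ((PySem.List.max?_eq_none_iff _ _).mp hx) (by simpa using hwne)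
    · simp [hm, hx]
  have hH := PySem.List.foldl_append_ite (fun ip : Int × Int => ip.2 = m)
    (fun ip : Int × Int => (PySem.List.pyGet? words ip.1).getD "")
    (PySem.List.enumerate (List.map sc words) 0) ([] : List String)
  simp only [List.nil_append] at hH
  have hH2 : List.foldl (fun acc ip => if ip.2 = m then acc ++ [(PySem.List.pyGet? words ip.1).getD ""] else acc) []
      (PySem.List.enumerate (List.map sc words))
      = List.map (fun ip => (PySem.List.pyGet? words ip.1).getD "")
        (List.filter (fun x => decide (x.2 = m)) (PySem.List.enumerate (List.map sc words))) := hH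
  rw [hH2]
  obtain ⟨k0, hk0, hk0m⟩ := List.mem_iff_getElem.mp (PySem.List.max?_mem hmax)
  have hk0n : k0 < words.length := by simpa using hk0
  have hk0sc : sc words[k0] = m := by simpa using hk0m
  have hmax_all : ∀ i, (hi : i < words.length) → sc words[i] ≤ m := fun i hi =>
    PySem.List.max?_isMax hmax (sc words[i]) (by exact List.mem_map_of_mem (List.getElem_mem hi))
  -- ---- the filtered index list and the highest_word list ----
  have hf : ∀ (i : Nat), (hi : i < words.length) →
      (PySem.List.pyGet? words ((i : Nat) : Int)).getD "" = words[i] := by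
    intro i hi
    rw [PySem.List.pyGet?_natCast, List.getElem?_eq_getElem hi]
    rfl
  have hidxs_get : ∀ u, (hu : u < ((PySem.List.enumerate (words.map sc) 0).filter
        (fun x => decide (x.2 = m))).length) →
      ∃ i, ∃ (hi : i < words.length),
        ((PySem.List.enumerate (words.map sc) 0).filter (fun x => decide (x.2 = m)))[u]
          = ((i : Int), m) ∧ sc words[i] = m := by
    intro u hu
    have hmem := List.getElem_mem hu
    have h1 := List.mem_filter.mp hmem
    obtain ⟨k, hk, hkeq⟩ := (PySem.List.mem_enumerate_iff _ _ _).mp h1.1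
    have hdec : (((PySem.List.enumerate (words.map sc) 0).filter
        (fun x => decide (x.2 = m)))[u]).2 = m := by simpa using h1.2
    have hkn : k < words.length := by simpa using hk
    have hksc : sc words[k] = m := by
      have := congrArg Prod.snd hkeq
      simp at this
      rw [this] at hdec
      simpa using hdec
    refine ⟨k, hkn, ?_, hksc⟩
    rw [hkeq]
    simp [hksc]
  have hidxs_mem : ∀ i, (hi : i < words.length) → sc words[i] = m →
      ((i : Int), m) ∈ (PySem.List.enumerate (words.map sc) 0).filter (fun x => decide (x.2 = m)) := by
    intro i hi him
    refine List.mem_filter.mpr ⟨?_, by simp⟩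
    refine (PySem.List.mem_enumerate_iff _ _ _).mpr ⟨i, by simpa using hi, ?_⟩
    simp [him]
  have hord := List.pairwise_iff_getElem.mp
    (List.Pairwise.sublist (List.filter_sublist (p := fun x : Int × Int => decide (x.2 = m)))
      (PySem.List.pairwise_lt_enumerate (words.map sc) 0))
  -- ---- best = min(highest_word, key=len) ----
  rcases hminr : PySem.List.min?
      (((PySem.List.enumerate (words.map sc) 0).filter (fun x => decide (x.2 = m))).map
        (fun ip => (PySem.List.pyGet? words ip.1).getD ""))
      (fun w => PySem.Str.len w) with _ | best
  · exfalso
    have hnil := (PySem.List.min?_eq_none_iff _ _).mp hminr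
    have : words[k0] ∈ (((PySem.List.enumerate (words.map sc) 0).filter
        (fun x => decide (x.2 = m))).map (fun ip => (PySem.List.pyGet? words ip.1).getD "")) :=
      List.mem_map.mpr ⟨((k0 : Int), m), hidxs_mem k0 hk0n hk0sc, hf k0 hk0n⟩
    rw [hnil] at this
    simp at this
  rw [hminr]
  simp only [Option.getD_some]
  obtain ⟨t, ht, hHt, hfirst⟩ := min?_first _ _ _ hminr
  have htl : t < ((PySem.List.enumerate (words.map sc) 0).filter
      (fun x => decide (x.2 = m))).length := by simpa using ht
  obtain ⟨it, hit, hiteq, hitsc⟩ := hidxs_get t htl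
  have hbest : best = words[it] := by
    rw [← hHt, List.getElem_map, hiteq]
    exact hf it hit
  have hminall : ∀ i, (hi : i < words.length) → sc words[i] = m →
      PySem.Str.len best ≤ PySem.Str.len words[i] := by
    intro i hi him
    exact PySem.List.min?_isMin hminr words[i]
      (List.mem_map.mpr ⟨((i : Int), m), hidxs_mem i hi him, hf i hi⟩)
  have hfirstidx : ∀ i, (hi : i < words.length) → i < it → sc words[i] = m →
      PySem.Str.len best < PySem.Str.len words[i] := by
    intro i hi hlt him
    obtain ⟨u, hu, hueq⟩ := List.mem_iff_getElem.mp (hidxs_mem i hi him)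
    have hune : u ≠ t := by
      intro rfl'
      subst rfl'
      rw [hueq] at hiteq
      have : (i : Int) = (it : Int) := congrArg Prod.fst hiteq
      omega
    have hut : u < t := by
      by_contra hge
      have htu : t < u := by omega
      have := hord t u htl hu htu
      rw [hueq, hiteq] at this
      simp at this
      omega
    have := hfirst u hut
    rw [List.getElem_map, hueq] at this
    rw [hf i hi] at this
    exact this
  -- ---- B's single pass ----
  rw [show (PySem.List.enumerate words).foldl
        (fun (acc : Option (Int × (Int × Int))) iw =>
          let key := (sc iw.2, -(PySem.Str.len iw.2))
          match acc with
          | none => some (iw.1, key)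
          | some bb => if pvKeyLt bb.2 key then some (iw.1, key) else some bb)
        none
      = ((PySem.List.enumerate words).map
          (fun iw : Int × String => (iw.1, (sc iw.2, -(PySem.Str.len iw.2))))).foldl
        (fun (acc : Option (Int × (Int × Int))) p =>
          match acc with
          | none => some p
          | some bb => if pvKeyLt bb.2 p.2 then some p else some bb) none
      from (List.foldl_map
        (f := fun iw : Int × String => (iw.1, (sc iw.2, -(PySem.Str.len iw.2))))
        (g := fun (acc : Option (Int × (Int × Int))) p =>
          match acc with
          | none => some p
          | some bb => if pvKeyLt bb.2 p.2 then some p else some bb)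
        (l := PySem.List.enumerate words) (init := none)).symm]
  have hBne : ((PySem.List.enumerate words).map
      (fun iw : Int × String => (iw.1, (sc iw.2, -(PySem.Str.len iw.2))))) ≠ [] := by
    intro h
    apply hwne
    have := congrArg List.length h
    simp [PySem.List.length_enumerate] at this
    exact this
  obtain ⟨tB, htB, hBfold, hBmax, hBfirst⟩ := foldB_first _ hBne
  rw [hBfold]
  have hplen : ((PySem.List.enumerate words).map
      (fun iw : Int × String => (iw.1, (sc iw.2, -(PySem.Str.len iw.2))))).length
      = words.length := by simp [PySem.List.length_enumerate]
  have hpget : ∀ u, (hu : u < words.length) →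
      ((PySem.List.enumerate words).map
        (fun iw : Int × String => (iw.1, (sc iw.2, -(PySem.Str.len iw.2)))))[u]'(by omega)
      = ((u : Int), (sc words[u], -(PySem.Str.len words[u]))) := by
    intro u hu
    rw [List.getElem_map, PySem.List.getElem_enumerate]
    simp
  have htBn : tB < words.length := by omega
  rw [hpget tB htBn]
  simp only
  -- ---- B's winner has the max score ----
  have htBsc : sc words[tB] = m := by
    have h1 := hBmax k0 (by omega)
    rw [hpget tB htBn, hpget k0 hk0n] at h1
    simp [pvKeyLt] at h1
    have h2 := hmax_all tB htBn
    omega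
  -- ---- B's winner is A's min-by-len tie-break winner ----
  have htBit : tB = it := by
    rcases Nat.lt_trichotomy tB it with hlt | heq | hgt
    · exfalso
      have h1 := hfirstidx tB htBn hlt htBsc
      have h2 := hBmax it (by omega)
      rw [hpget tB htBn, hpget it hit] at h2
      simp [pvKeyLt, htBsc, hitsc] at h2
      rw [hbest] at h1
      simp [PySem.Str.len] at h1
      omega
    · exact heq
    · exfalso
      have h1 := hBfirst it hgt
      rw [hpget tB htBn, hpget it hit] at h1
      simp [pvKeyLt, htBsc, hitsc] at h1
      have h2 := hminall tB htBn htBsc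
      rw [hbest] at h2
      simp [PySem.Str.len] at h2
      omega
  -- ---- words.index returns exactly that index ----
  have hbmem : best ∈ words := by
    rw [hbest]
    exact List.getElem_mem hit
  obtain ⟨j0, hj0⟩ := Option.isSome_iff_exists.mp
    ((PySem.List.index?_isSome_iff words best).mpr hbmem)
  rw [hj0]
  obtain ⟨hj0lt, hj0w, hj0ne⟩ := PySem.List.getElem_of_index?_eq_some hj0
  have hwtB : words[tB] = best := by subst htBit; exact hbest.symm
  have hj0le : j0 ≤ tB := by
    by_contra hgt
    exact hj0ne tB (by omega) hwtB
  have hj0tB : j0 = tB := by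
    rcases Nat.lt_or_ge j0 tB with hlt | hge
    · exfalso
      have h1 := hBfirst j0 hlt
      rw [hpget tB htBn, hpget j0 (by omega)] at h1
      have hkeyeq : words[j0] = words[tB] := by rw [hj0w, hwtB]
      rw [hkeyeq] at h1
      simp [pvKeyLt] at h1
    · omega
  rw [hj0tB]
  simp

-- ===== VERDICT (by name: the statement is the Claim_ definition above) =====
theorem get_best_word_spec : Claim_equal_get_best_word := by
  intro points words _hdom hpre
  obtain ⟨hwne, hlen, hchB⟩ := hpre
  have hch : ∀ w ∈ words, ∀ c ∈ w.toList, 65 ≤ c.toNat ∧ c.toNat < 65 + points.length := by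
    simpa [List.all_eq_true, Bool.and_eq_true, decide_eq_true_eq] using hchB
  unfold Spec_get_best_word
  have hpw : words.foldl (fun acc word => acc ++ [eval_word (lpOf points) word]) []
      = words.map (pvScore points) := by
    rw [PySem.List.foldl_append_singleton_eq_map]
    simp only [List.nil_append]
    exact List.map_congr_left (fun w hw => eval_eq points w hlen (hch w hw))
  rw [A_unfold, hpw]
  exact select_eq (pvScore points) words hwne
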